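-- pv_equiv track=rewrite | github.com/PetrGallus/AoC | 2023/d1/Adventer-d1p1.py | sum_calibration_values
-- ===== SOURCE A (Python) =====
-- def sum_calibration_values(data):
--     total_sum = 0
--     for line in data:
--         digits = [char for char in line if char.isdigit()]
--         if digits:
--             # Combine the first and last digit to form a two-digit number
--             calibration_value = int(digits[0] + digits[-1])
--             total_sum += calibration_value
--     return total_sum
-- ===== SOURCE B (Python) =====
-- def sum_calibration_values(data):
--     total = 0
--     for line in data:
--         first = None
--         for ch in line:
--             if ch.isdigit():
--                 first = ch
--                 break
--         if first is None:
--             continue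
--         for ch in reversed(line):
--             if ch.isdigit():
--                 last = ch
--                 break
--         total += int(first + last)
--     return total
-- ===== Notes on version B (the rewrite author's own statement) =====
-- stated objective: alternative
-- what changed: Instead of materialising the list of all digits per line and indexing its ends, B makes two early-exit directional scans (left-to-right for the first digit, reversed for the last) and never builds an intermediate list.
import Mathlib
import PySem

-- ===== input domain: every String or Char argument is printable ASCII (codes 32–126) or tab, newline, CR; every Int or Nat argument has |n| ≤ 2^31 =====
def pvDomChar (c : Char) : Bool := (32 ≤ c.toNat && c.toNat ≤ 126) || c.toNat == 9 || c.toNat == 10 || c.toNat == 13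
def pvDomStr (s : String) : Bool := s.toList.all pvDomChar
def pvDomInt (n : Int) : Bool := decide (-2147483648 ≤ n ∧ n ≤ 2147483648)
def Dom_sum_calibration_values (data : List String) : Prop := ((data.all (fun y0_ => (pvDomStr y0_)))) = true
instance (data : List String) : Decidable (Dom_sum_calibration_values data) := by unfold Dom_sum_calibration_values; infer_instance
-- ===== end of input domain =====

-- B replaces A's per-line digit-list comprehension by two early-exit directional scans; same result, no intermediate list.

-- ===== PORT A =====
-- int(digits[0] + digits[-1]): on a nonempty digit list, digits[-1] is getLast; within Dom it always parses, .getD 0 is never used.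
def sum_calibration_values (data : List String) : Int :=
  data.foldl
    (fun total_sum line =>
      match line.toList.filter PySem.Chars.isdigit with
      | [] => total_sum
      | d :: rest =>
        total_sum + (PySem.Int.ofChars? [d, (d :: rest).getLast (by simp)]).getD 0)
    0

-- ===== PORT B =====
-- the 'for … if ch.isdigit(): …; break' loop of Source B
def pvFindDigit : List Char → Option Char
  | [] => none
  | c :: rest => if PySem.Chars.isdigit c then some c else pvFindDigit rest

def sum_calibration_values_alt (data : List String) : Int :=
  data.foldl
    (fun total line =>
      match pvFindDigit line.toList with
      | none => total
      | some first =>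
        match pvFindDigit line.toList.reverse with
        | none => total   -- unreachable: a digit exists, so the reversed scan finds one
        | some last => total + (PySem.Int.ofChars? [first, last]).getD 0)
    0

-- ===== PRECONDITION & SPEC =====
def Spec_sum_calibration_values (data : List String) (out : Int) : Prop := out = sum_calibration_values_alt data
instance (data : List String) (out : Int) : Decidable (Spec_sum_calibration_values data out) := by unfold Spec_sum_calibration_values; infer_instance

-- ===== CLAIM (what is proved, stated in full; the proofs are below) =====
def Claim_equal_sum_calibration_values : Prop := ∀ (data : List String), Dom_sum_calibration_values data → Spec_sum_calibration_values data (sum_calibration_values data)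

-- ===== LEMMAS AND PROOFS =====

theorem pvFindDigit_eq_head_filter (l : List Char) :
    pvFindDigit l = (l.filter PySem.Chars.isdigit).head? := by
  induction l with
  | nil => rfl
  | cons c rest ih =>
    by_cases h : PySem.Chars.isdigit c <;> simp [pvFindDigit, h, ih]

theorem step_eq (total : Int) (line : String) :
    (match line.toList.filter PySem.Chars.isdigit with
      | [] => total
      | d :: rest =>
        total + (PySem.Int.ofChars? [d, (d :: rest).getLast (by simp)]).getD 0) =
    (match pvFindDigit line.toList with
      | none => total
      | some first =>
        match pvFindDigit line.toList.reverse with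
        | none => total
        | some last => total + (PySem.Int.ofChars? [first, last]).getD 0) := by
  rw [pvFindDigit_eq_head_filter, pvFindDigit_eq_head_filter, List.filter_reverse,
    List.head?_reverse]
  cases h : line.toList.filter PySem.Chars.isdigit with
  | nil => simp
  | cons d rest =>
    simp [List.getLast?_eq_some_getLast]

-- ===== VERDICT (by name: the statement is the Claim_ definition above) =====
theorem sum_calibration_values_spec : Claim_equal_sum_calibration_values := by
  intro data _
  show sum_calibration_values data = sum_calibration_values_alt data
  unfold sum_calibration_values sum_calibration_values_alt
  congr 1
  funext t l
  exact step_eq t l
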